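-- pv_equiv track=rewrite | github.com/chick0/deploy | utils/type.py | verify_type
-- ===== SOURCE A (Python) =====
-- from enum import Enum
--
-- class ProjectType(Enum):
--     """
--     Type for Project.
--     """
--     FRONTEND = 0
--     BACKEND = 1
--     BOT = 2
--
-- def verify_type(project_type: int) -> bool:
--     """
--     Verify project type is correct
--
--     :param project_type: project type for test
--     :return: verify result
--     """
--     return any(
--         [
--             getattr(ProjectType, x).value == project_type
--             for x in dir(ProjectType)
--             if isinstance(getattr(ProjectType, x), ProjectType)
--         ]
--     )
-- ===== SOURCE B (Python) =====
-- from enum import Enum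
--
-- class ProjectType(Enum):
--     """
--     Type for Project.
--     """
--     FRONTEND = 0
--     BACKEND = 1
--     BOT = 2
--
-- def verify_type(project_type: int) -> bool:
--     """
--     Verify project type is correct
--
--     :param project_type: project type for test
--     :return: verify result
--     """
--     try:
--         ProjectType(project_type)
--         return True
--     except ValueError:
--         return False
-- ===== Notes on version B (the rewrite author's own statement) =====
-- stated objective: idiomatic
-- what changed: Replaces the explicit dir()-based scan over all enum attributes with the Enum constructor's built-in value lookup guarded by try/except ValueError.
import Mathlib
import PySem

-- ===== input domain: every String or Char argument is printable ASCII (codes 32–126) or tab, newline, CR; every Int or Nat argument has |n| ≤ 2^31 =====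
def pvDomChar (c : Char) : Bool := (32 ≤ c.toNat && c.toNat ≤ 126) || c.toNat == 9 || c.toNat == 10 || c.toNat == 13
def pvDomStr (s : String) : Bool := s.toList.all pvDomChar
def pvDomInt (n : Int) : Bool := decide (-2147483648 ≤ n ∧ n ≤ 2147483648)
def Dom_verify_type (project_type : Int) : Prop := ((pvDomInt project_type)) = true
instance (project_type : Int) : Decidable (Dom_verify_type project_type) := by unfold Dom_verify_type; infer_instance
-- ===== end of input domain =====

-- B replaces A's explicit scan over dir(ProjectType) with the Enum constructor's
-- value lookup guarded by try/except (idiomatic; same result).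

-- ===== PORT A =====
-- dir(ProjectType) lists members alphabetically: BACKEND=1, BOT=2, FRONTEND=0;
-- A builds the list of comparisons and takes any().
def verify_type (project_type : Int) : Bool :=
  (([1, 2, 0] : List Int).map (fun v => v == project_type)).any id

-- ===== PORT B =====
-- Enum's value→member lookup table in definition order; try/except ValueError
-- becomes: lookup succeeds ↦ true, fails ↦ false.
def projectTypeValue2Member : PySem.Dict Int String :=
  PySem.Dict.mk [((0:Int), "FRONTEND"), (1, "BACKEND"), (2, "BOT")]

def verify_type_alt (project_type : Int) : Bool :=
  (PySem.Dict.get? projectTypeValue2Member project_type).isSome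

-- ===== PRECONDITION & SPEC =====
def Spec_verify_type (project_type : Int) (out : Bool) : Prop := out = verify_type_alt project_type
instance (project_type : Int) (out : Bool) : Decidable (Spec_verify_type project_type out) := by unfold Spec_verify_type; infer_instance

-- ===== CLAIM (what is proved, stated in full; the proofs are below) =====
def Claim_equal_verify_type : Prop := ∀ (project_type : Int), Dom_verify_type project_type → Spec_verify_type project_type (verify_type project_type)

-- ===== LEMMAS AND PROOFS =====

-- ===== VERDICT (by name: the statement is the Claim_ definition above) =====
theorem verify_type_spec : Claim_equal_verify_type := by
  intro p _
  unfold Spec_verify_type verify_type verify_type_alt projectTypeValue2Member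
  rcases eq_or_ne p 0 with h0 | h0
  · subst h0; decide
  rcases eq_or_ne p 1 with h1 | h1
  · subst h1; decide
  rcases eq_or_ne p 2 with h2 | h2
  · subst h2; decide
  rw [PySem.Dict.get?_mk_cons, if_neg (by simp; omega),
      PySem.Dict.get?_mk_cons, if_neg (by simp; omega),
      PySem.Dict.get?_mk_cons, if_neg (by simp; omega)]
  simp [PySem.Dict.get?]
  omega
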